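-- pv_equiv track=rewrite | github.com/iKefir/Diplom | 2_analyze/analyse_all.py | prepare_res
-- ===== SOURCE A (Python) =====
-- def prepare_res(inds, results, border):
--     inds = inds[1:]
--     results = results[1:]
--     new_inds = []
--     new_results = []
--     for i, r in zip(inds, results):
--         if i > border:
--             break
--         new_inds.append(i)
--         new_results.append(r)
--     return new_inds, new_results
-- ===== SOURCE B (Python) =====
-- def prepare_res(inds, results, border):
--     n = min(len(inds), len(results))
--     cut = n - 1 if n > 0 else 0
--     for k, i in enumerate(inds[1:n]):
--         if i > border:
--             cut = k
--             break
--     return inds[1:1 + cut], results[1:1 + cut]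
-- ===== Notes on version B (the rewrite author's own statement) =====
-- stated objective: alternative
-- what changed: B computes a single cutoff index with one scan and slices both lists once, instead of growing two accumulator lists with per-element appends.
import Mathlib
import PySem

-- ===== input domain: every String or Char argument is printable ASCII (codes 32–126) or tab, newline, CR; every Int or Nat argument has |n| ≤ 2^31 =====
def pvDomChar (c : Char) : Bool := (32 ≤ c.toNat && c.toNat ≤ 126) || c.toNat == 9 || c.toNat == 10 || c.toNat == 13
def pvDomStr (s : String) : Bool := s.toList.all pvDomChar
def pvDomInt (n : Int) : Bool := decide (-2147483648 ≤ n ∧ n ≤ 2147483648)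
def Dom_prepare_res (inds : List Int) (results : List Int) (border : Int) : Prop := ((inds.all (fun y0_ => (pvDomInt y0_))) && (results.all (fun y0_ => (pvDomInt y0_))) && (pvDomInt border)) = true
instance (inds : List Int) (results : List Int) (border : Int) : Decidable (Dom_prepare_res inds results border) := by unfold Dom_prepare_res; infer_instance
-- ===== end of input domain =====

-- ===== PORT A =====
-- B changes only the decomposition: one cutoff index + slicing instead of two append-accumulators; same cost (objective: alternative).
-- loop over zip(inds[1:], results[1:]) with break, appending to the two accumulators
def prepareLoopA : List (Int × Int) → Int → List Int → List Int → List Int × List Int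
  | [], _, ni, nr => (ni, nr)
  | (i, r) :: rest, border, ni, nr =>
      if i > border then (ni, nr)
      else prepareLoopA rest border (ni ++ [i]) (nr ++ [r])

def prepare_res (inds : List Int) (results : List Int) (border : Int) : List Int × List Int :=
  prepareLoopA ((inds.drop 1).zip (results.drop 1)) border [] []

-- ===== PORT B =====
-- index of the first element exceeding border, else the list's length (B's enumerate scan)
def cutScan : List Int → Int → Nat
  | [], _ => 0
  | i :: rest, border => if i > border then 0 else 1 + cutScan rest border

def prepare_res_alt (inds : List Int) (results : List Int) (border : Int) : List Int × List Int :=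
  let n := min inds.length results.length
  let cut := cutScan ((inds.drop 1).take (n - 1)) border
  ((inds.drop 1).take cut, (results.drop 1).take cut)

-- ===== PRECONDITION & SPEC =====
def Spec_prepare_res (inds : List Int) (results : List Int) (border : Int) (out : List Int × List Int) : Prop := out = prepare_res_alt inds results border
instance (inds : List Int) (results : List Int) (border : Int) (out : List Int × List Int) : Decidable (Spec_prepare_res inds results border out) := by unfold Spec_prepare_res; infer_instance

-- ===== CLAIM (what is proved, stated in full; the proofs are below) =====
def Claim_equal_prepare_res : Prop := ∀ (inds : List Int) (results : List Int) (border : Int), Dom_prepare_res inds results border → Spec_prepare_res inds results border (prepare_res inds results border)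

-- ===== LEMMAS AND PROOFS =====
theorem prepareLoop_key (xs : List Int) : ∀ (ys : List Int) (b : Int) (ni nr : List Int),
    prepareLoopA (xs.zip ys) b ni nr =
      (ni ++ xs.take (cutScan (xs.take (min xs.length ys.length)) b),
       nr ++ ys.take (cutScan (xs.take (min xs.length ys.length)) b)) := by
  induction xs with
  | nil => intro ys b ni nr; simp [prepareLoopA, cutScan]
  | cons x xs ih =>
    intro ys b ni nr
    cases ys with
    | nil => simp [prepareLoopA, cutScan]
    | cons y ys =>
      simp only [List.zip_cons_cons, prepareLoopA]
      have hmin : min (x :: xs).length (y :: ys).length = (min xs.length ys.length) + 1 := by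
        simp only [List.length_cons]; omega
      rw [hmin]
      by_cases h : x > b
      · simp [h, cutScan, List.take_succ_cons]
      · simp only [h, if_false, List.take_succ_cons, cutScan]
        rw [ih ys b (ni ++ [x]) (nr ++ [y])]
        simp [Nat.add_comm 1]

-- ===== VERDICT (by name: the statement is the Claim_ definition above) =====
theorem prepare_res_spec : Claim_equal_prepare_res := by
  intro inds results border _
  show prepare_res inds results border = prepare_res_alt inds results border
  unfold prepare_res prepare_res_alt
  rw [prepareLoop_key]
  have h : min (List.length (inds.drop 1)) (List.length (results.drop 1)) =
      min inds.length results.length - 1 := by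
    simp only [List.length_drop]; omega
  rw [h]
  simp
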